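-- pv_equiv track=rewrite | github.com/geurtjens/e2_fpga | tests/test_ColourToDomain_Rotation.py | reference
-- ===== SOURCE A (Python) =====
-- V  = 16
--
-- def reference(domain, c_top, c_right, c_bottom, c_left,
--               el_top, el_right, el_bottom, el_left):
--     out = 0
--     for p in range(V):
--         if (domain >> p) & 1:
--             if (c_top    & el_top[p])    != 0 and \
--                (c_right  & el_right[p])  != 0 and \
--                (c_bottom & el_bottom[p]) != 0 and \
--                (c_left   & el_left[p])   != 0:
--                 out |= 1 << p
--     return out
-- ===== SOURCE B (Python) =====
-- V = 16
--
-- def reference(domain, c_top, c_right, c_bottom, c_left,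
--               el_top, el_right, el_bottom, el_left):
--     # Recurse on the remaining bits of the 16-bit-masked domain, halving it
--     # each step; stops as soon as no set bits remain, builds the mask on return.
--     def go(d, p):
--         if d == 0:
--             return 0
--         rest = go(d >> 1, p + 1)
--         if d & 1 and (c_top & el_top[p]) != 0 and (c_right & el_right[p]) != 0 \
--                  and (c_bottom & el_bottom[p]) != 0 and (c_left & el_left[p]) != 0:
--             return rest | (1 << p)
--         return rest
--     return go(domain & 0xFFFF, 0)
-- ===== Notes on version B (the rewrite author's own statement) =====
-- stated objective: alternative
-- what changed: Replaces the fixed 16-iteration indexed loop with an OR-accumulator by a recursion that halves the masked domain (d >> 1), tests only the current low bit, stops as soon as no set bits remain, and assembles the result mask on the way back up.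
import Mathlib
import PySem

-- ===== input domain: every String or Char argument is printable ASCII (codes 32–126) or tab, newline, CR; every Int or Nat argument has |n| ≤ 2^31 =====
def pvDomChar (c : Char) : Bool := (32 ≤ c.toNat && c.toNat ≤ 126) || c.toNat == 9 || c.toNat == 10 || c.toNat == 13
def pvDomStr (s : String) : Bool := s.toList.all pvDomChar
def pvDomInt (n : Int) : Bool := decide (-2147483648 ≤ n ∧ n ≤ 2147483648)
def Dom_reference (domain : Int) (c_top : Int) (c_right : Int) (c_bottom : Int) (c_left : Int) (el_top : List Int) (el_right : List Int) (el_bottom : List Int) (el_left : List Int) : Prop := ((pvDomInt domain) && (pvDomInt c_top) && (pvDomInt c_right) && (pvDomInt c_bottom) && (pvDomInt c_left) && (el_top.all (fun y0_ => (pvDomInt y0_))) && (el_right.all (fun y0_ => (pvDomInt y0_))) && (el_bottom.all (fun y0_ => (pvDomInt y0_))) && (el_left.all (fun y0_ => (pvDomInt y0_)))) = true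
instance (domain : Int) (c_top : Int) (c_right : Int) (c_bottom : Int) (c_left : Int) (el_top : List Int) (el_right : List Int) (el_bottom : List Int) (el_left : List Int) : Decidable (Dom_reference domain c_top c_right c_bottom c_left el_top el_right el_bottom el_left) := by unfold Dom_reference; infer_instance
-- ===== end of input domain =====

-- ===== PORT A =====
-- B changes the traversal: a recursion that halves the 16-bit-masked domain and stops
-- when no set bits remain, instead of A's fixed 0..15 indexed sweep (objective: alternative).

-- shared helper: the four compatibility tests, written identically in both Python sources
def hit (c_top : Int) (c_right : Int) (c_bottom : Int) (c_left : Int) (el_top : List Int) (el_right : List Int) (el_bottom : List Int) (el_left : List Int) (p : Int) : Bool :=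
  (PySem.Int.band c_top (PySem.List.pyGetD el_top p 0) != 0) &&
  (PySem.Int.band c_right (PySem.List.pyGetD el_right p 0) != 0) &&
  (PySem.Int.band c_bottom (PySem.List.pyGetD el_bottom p 0) != 0) &&
  (PySem.Int.band c_left (PySem.List.pyGetD el_left p 0) != 0)

-- for p in range(16): if (domain >> p) & 1: if <hit>: out |= 1 << p
-- (p drawn from range(16) is nonnegative, so p.toNat is exact)
def reference (domain : Int) (c_top : Int) (c_right : Int) (c_bottom : Int) (c_left : Int) (el_top : List Int) (el_right : List Int) (el_bottom : List Int) (el_left : List Int) : Int :=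
  (PySem.List.pyRange 0 16 1).foldl (fun out p =>
    if PySem.Int.band (domain >>> p.toNat) 1 != 0 then
      if hit c_top c_right c_bottom c_left el_top el_right el_bottom el_left p then
        PySem.Int.bor out (1 <<< p.toNat)
      else out
    else out) 0

-- ===== PORT B =====
-- go(d, p) from Source B; d = domain & 0xFFFF >= 0 stays nonnegative, so it is a Nat here (exact)
def go (c_top : Int) (c_right : Int) (c_bottom : Int) (c_left : Int) (el_top : List Int) (el_right : List Int) (el_bottom : List Int) (el_left : List Int) (d : Nat) (p : Nat) : Int :=
  if d = 0 then 0
  else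
    let rest := go c_top c_right c_bottom c_left el_top el_right el_bottom el_left (d >>> 1) (p + 1)
    if d &&& 1 = 1 ∧ hit c_top c_right c_bottom c_left el_top el_right el_bottom el_left (p : Int) = true then
      PySem.Int.bor rest (1 <<< p)
    else rest
termination_by d
decreasing_by rw [Nat.shiftRight_one]; exact Nat.div_lt_self (Nat.pos_of_ne_zero (by assumption)) one_lt_two

def reference_alt (domain : Int) (c_top : Int) (c_right : Int) (c_bottom : Int) (c_left : Int) (el_top : List Int) (el_right : List Int) (el_bottom : List Int) (el_left : List Int) : Int :=
  go c_top c_right c_bottom c_left el_top el_right el_bottom el_left (PySem.Int.band domain 65535).toNat 0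

-- ===== PRECONDITION & SPEC =====
-- Pre_ excludes exactly the inputs on which Python A raises IndexError: some set domain
-- bit p < 16 whose short-circuited chain of tests reaches an element list of length <= p.
def Pre_reference (domain : Int) (c_top : Int) (c_right : Int) (c_bottom : Int) (c_left : Int) (el_top : List Int) (el_right : List Int) (el_bottom : List Int) (el_left : List Int) : Prop :=
  ∀ p : Nat, p < 16 → PySem.Int.band (domain >>> p) 1 ≠ 0 →
    (p < el_top.length ∧
      (PySem.Int.band c_top (PySem.List.pyGetD el_top (p : Int) 0) ≠ 0 →
        (p < el_right.length ∧
          (PySem.Int.band c_right (PySem.List.pyGetD el_right (p : Int) 0) ≠ 0 →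
            (p < el_bottom.length ∧
              (PySem.Int.band c_bottom (PySem.List.pyGetD el_bottom (p : Int) 0) ≠ 0 →
                p < el_left.length))))))
instance (domain : Int) (c_top : Int) (c_right : Int) (c_bottom : Int) (c_left : Int) (el_top : List Int) (el_right : List Int) (el_bottom : List Int) (el_left : List Int) : Decidable (Pre_reference domain c_top c_right c_bottom c_left el_top el_right el_bottom el_left) := by unfold Pre_reference; apply Nat.decidableBallLT

def pvWitness_reference : Int × Int × Int × Int × Int × List Int × List Int × List Int × List Int :=
  (5, 1, 1, 1, 1, [1, 0, 3], [1, 0, 1], [3, 0, 1], [1, 0, 1])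

def Spec_reference (domain : Int) (c_top : Int) (c_right : Int) (c_bottom : Int) (c_left : Int) (el_top : List Int) (el_right : List Int) (el_bottom : List Int) (el_left : List Int) (out : Int) : Prop := out = reference_alt domain c_top c_right c_bottom c_left el_top el_right el_bottom el_left
instance (domain : Int) (c_top : Int) (c_right : Int) (c_bottom : Int) (c_left : Int) (el_top : List Int) (el_right : List Int) (el_bottom : List Int) (el_left : List Int) (out : Int) : Decidable (Spec_reference domain c_top c_right c_bottom c_left el_top el_right el_bottom el_left out) := by unfold Spec_reference; infer_instance

-- ===== CLAIM (what is proved, stated in full; the proofs are below) =====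
def Claim_equal_reference : Prop := ∀ (domain : Int) (c_top : Int) (c_right : Int) (c_bottom : Int) (c_left : Int) (el_top : List Int) (el_right : List Int) (el_bottom : List Int) (el_left : List Int), Dom_reference domain c_top c_right c_bottom c_left el_top el_right el_bottom el_left → Pre_reference domain c_top c_right c_bottom c_left el_top el_right el_bottom el_left → Spec_reference domain c_top c_right c_bottom c_left el_top el_right el_bottom el_left (reference domain c_top c_right c_bottom c_left el_top el_right el_bottom el_left)

-- ===== LEMMAS AND PROOFS =====

-- Nat-valued mirror of go, for reasoning about the accumulated OR of disjoint bits
def gN (c_top : Int) (c_right : Int) (c_bottom : Int) (c_left : Int) (el_top : List Int) (el_right : List Int) (el_bottom : List Int) (el_left : List Int) (d : Nat) (p : Nat) : Nat :=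
  if d = 0 then 0
  else
    let rest := gN c_top c_right c_bottom c_left el_top el_right el_bottom el_left (d >>> 1) (p + 1)
    if d &&& 1 = 1 ∧ hit c_top c_right c_bottom c_left el_top el_right el_bottom el_left (p : Int) = true then
      rest ||| 2 ^ p
    else rest
termination_by d
decreasing_by rw [Nat.shiftRight_one]; exact Nat.div_lt_self (Nat.pos_of_ne_zero (by assumption)) one_lt_two

theorem go_eq_gN (c_top c_right c_bottom c_left : Int) (el_top el_right el_bottom el_left : List Int) (d p : Nat) :
    go c_top c_right c_bottom c_left el_top el_right el_bottom el_left d p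
      = ((gN c_top c_right c_bottom c_left el_top el_right el_bottom el_left d p : Nat) : Int) := by
  induction d using Nat.strong_induction_on generalizing p with
  | _ d ih =>
    rw [go, gN]
    by_cases h : d = 0
    · simp [h]
    · simp only [h, if_false]
      have hlt : d >>> 1 < d := by
        rw [Nat.shiftRight_one]
        exact Nat.div_lt_self (Nat.pos_of_ne_zero h) one_lt_two
      rw [ih (d >>> 1) hlt (p + 1)]
      split
      · rw [PySem.Int.bor_natCast, Nat.one_shiftLeft]
      · rfl

theorem gN_unfold (c_top c_right c_bottom c_left : Int) (el_top el_right el_bottom el_left : List Int) (d p : Nat) :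
    gN c_top c_right c_bottom c_left el_top el_right el_bottom el_left d p
      = if d &&& 1 = 1 ∧ hit c_top c_right c_bottom c_left el_top el_right el_bottom el_left (p : Int) = true then
          gN c_top c_right c_bottom c_left el_top el_right el_bottom el_left (d >>> 1) (p + 1) ||| 2 ^ p
        else gN c_top c_right c_bottom c_left el_top el_right el_bottom el_left (d >>> 1) (p + 1) := by
  by_cases h : d = 0
  · subst h
    rw [gN, gN]
    simp
  · rw [gN]
    simp [h]

theorem mask16 (n : Nat) : n &&& 65535 = n % 65536 := by
  have := Nat.and_two_pow_sub_one_eq_mod n 16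
  norm_num at this
  exact this

theorem band_mask (a : Int) : PySem.Int.band a 65535 = a % 65536 := by
  rw [PySem.Int.band]
  have h1 : ((65535:Int)).toNat = 65535 := by decide
  split
  · next h =>
    simp only [show (0:Int) ≤ 65535 by decide, if_true, h1, mask16]
    omega
  · next h =>
    simp only [show (0:Int) ≤ 65535 by decide, if_true, h1, Nat.land_comm 65535, mask16]
    omega

theorem ediv_mask (a : Int) (k : Nat) (hk : k < 16) :
    (a % 65536) / 2^k % 2 = a / 2^k % 2 := by
  have hsplit : a = a % 65536 + (2:Int)^k * (2^(15-k) * 2 * (a / 65536)) := by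
    have h2 := Int.ediv_add_emod a 65536
    have hpow2 : (2:Int)^k * 2^(15-k) = 32768 := by
      rw [← pow_add]; norm_num [show k + (15-k) = 15 by omega]
    calc a = 65536 * (a/65536) + a % 65536 := h2.symm
      _ = a % 65536 + ((2:Int)^k * 2^(15-k)) * (2 * (a/65536)) := by rw [hpow2]; ring
      _ = a % 65536 + (2:Int)^k * (2^(15-k) * 2 * (a/65536)) := by ring
  conv_rhs => rw [hsplit]
  rw [Int.add_mul_ediv_left _ _ (by positivity : ((2:Int)^k) ≠ 0)]
  rw [mul_comm ((2:Int)^(15-k)) 2, mul_assoc]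
  rw [Int.add_mul_emod_self_left]

theorem bit_agree (domain : Int) (k : Nat) (hk : k < 16) :
    (PySem.Int.band (domain >>> k) 1 ≠ 0) ↔ (((PySem.Int.band domain 65535).toNat >>> k) &&& 1 = 1) := by
  rw [PySem.Int.band_one, band_mask, PySem.Int.mod,
      Int.fmod_eq_emod_of_nonneg _ (by norm_num : (0:Int) ≤ 2),
      Int.shiftRight_eq_div_pow, Nat.shiftRight_eq_div_pow, Nat.and_one_is_mod]
  simp only [Nat.cast_pow, Nat.cast_ofNat]
  have hr : (0:Int) ≤ domain % 65536 := by omega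
  have hcast : (((domain % 65536).toNat / 2 ^ k % 2 : Nat) : Int) = (domain % 65536) / 2^k % 2 := by
    push_cast [Int.toNat_of_nonneg hr]
    rfl
  have hm := ediv_mask domain k hk
  constructor
  · intro h
    have hx : domain / 2^k % 2 = 1 := by
      generalize domain / (2:Int)^k = x at h ⊢
      omega
    have h1 : (domain % 65536) / 2^k % 2 = 1 := by rw [hm, hx]
    have h2 : (((domain % 65536).toNat / 2 ^ k % 2 : Nat) : Int) = 1 := by rw [hcast]; exact h1
    exact_mod_cast h2
  · intro h
    have h1 : (((domain % 65536).toNat / 2 ^ k % 2 : Nat) : Int) = 1 := by exact_mod_cast h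
    rw [hcast, hm] at h1
    generalize domain / (2:Int)^k = x at h1 ⊢
    omega

theorem loop_eq (domain c_top c_right c_bottom c_left : Int) (el_top el_right el_bottom el_left : List Int) :
    ∀ (m k : Nat), k + m = 16 → ∀ (out : Nat),
      (PySem.List.pyRange (k : Int) 16 1).foldl (fun out p =>
        if PySem.Int.band (domain >>> p.toNat) 1 != 0 then
          if hit c_top c_right c_bottom c_left el_top el_right el_bottom el_left p then
            PySem.Int.bor out (1 <<< p.toNat)
          else out
        else out) ((out : Nat) : Int)
      = ((out ||| gN c_top c_right c_bottom c_left el_top el_right el_bottom el_left ((PySem.Int.band domain 65535).toNat >>> k) k : Nat) : Int) := by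
  intro m
  induction m with
  | zero =>
    intro k hk out
    have hk16 : k = 16 := by omega
    subst hk16
    rw [PySem.List.pyRange_one_eq_nil (by norm_num)]
    have hD : (PySem.Int.band domain 65535).toNat < 65536 := by
      rw [band_mask]; omega
    have hz : (PySem.Int.band domain 65535).toNat >>> 16 = 0 := by
      rw [Nat.shiftRight_eq_div_pow]
      exact Nat.div_eq_of_lt (by norm_num; omega)
    rw [List.foldl_nil, hz, gN]
    simp
  | succ m ih =>
    intro k hk out
    have hk16 : k < 16 := by omega
    rw [PySem.List.pyRange_one_cons (by exact_mod_cast hk16), List.foldl_cons]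
    have hstep : ((k : Int) + 1) = ((k + 1 : Nat) : Int) := by push_cast; ring
    have hb := bit_agree domain k hk16
    simp only [Int.toNat_natCast, hstep]
    rw [gN_unfold]
    by_cases hbit : ((PySem.Int.band domain 65535).toNat >>> k) &&& 1 = 1
    · have hbt : (PySem.Int.band (domain >>> ((k : Nat) : Int)) 1 != 0) = true := by
        rw [Int.shiftRight_natCast_right]
        simp only [bne_iff_ne, ne_eq]
        exact hb.mpr hbit
      rw [hbt, if_pos rfl]
      by_cases hhit : hit c_top c_right c_bottom c_left el_top el_right el_bottom el_left (k : Int) = true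
      · rw [if_pos hhit, if_pos ⟨hbit, hhit⟩]
        rw [PySem.Int.bor_natCast, Nat.one_shiftLeft]
        rw [ih (k + 1) (by omega) (out ||| 2 ^ k)]
        rw [← Nat.shiftRight_add]
        rw [Nat.lor_assoc, Nat.lor_comm (2 ^ k)]
      · rw [if_neg hhit, if_neg (fun hc => hhit hc.2)]
        rw [ih (k + 1) (by omega) out, ← Nat.shiftRight_add]
    · have hbt : (PySem.Int.band (domain >>> ((k : Nat) : Int)) 1 != 0) = false := by
        rw [Int.shiftRight_natCast_right]
        simp only [bne_eq_false_iff_eq]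
        by_contra hne
        exact hbit (hb.mp (by simpa using hne))
      rw [hbt, if_neg (by simp : ¬ (false = true)), if_neg (fun hc => hbit hc.1)]
      rw [ih (k + 1) (by omega) out, ← Nat.shiftRight_add]

-- ===== VERDICT (by name: the statement is the Claim_ definition above) =====
theorem reference_spec : Claim_equal_reference := by
  intro domain c_top c_right c_bottom c_left el_top el_right el_bottom el_left _ _
  show reference domain c_top c_right c_bottom c_left el_top el_right el_bottom el_left
      = reference_alt domain c_top c_right c_bottom c_left el_top el_right el_bottom el_left
  rw [reference, reference_alt, go_eq_gN]
  have h := loop_eq domain c_top c_right c_bottom c_left el_top el_right el_bottom el_left 16 0 rfl 0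
  simp only [Nat.cast_zero, Nat.shiftRight_zero, Nat.zero_or] at h
  exact h
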